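-- pv_equiv track=rewrite | github.com/atlasbioinfo/nanostructure | src/nanostructure/components/reads.py | find_available_track_position
-- ===== SOURCE A (Python) =====
-- def find_available_track_position(read_start, read_end, occupied_positions):
--     """Find first available vertical track position for read placement"""
--     track_pos = 0
--     while True:
--         can_place = True
--         for existing_read in occupied_positions:
--             if (read_start <= existing_read[1] and
--                 read_end >= existing_read[0] and
--                 track_pos == existing_read[2]):
--                 can_place = False
--                 break
--         if can_place:
--             return track_pos
--         track_pos += 1
-- ===== SOURCE B (Python) =====
-- def find_available_track_position(read_start, read_end, occupied_positions):
--     """Find first available vertical track position for read placement"""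
--     blocked = sorted({r[2] for r in occupied_positions
--                       if read_start <= r[1] and read_end >= r[0]})
--     pos = 0
--     for v in blocked:
--         if v == pos:
--             pos += 1
--         elif v > pos:
--             break
--     return pos
-- ===== Notes on version B (the rewrite author's own statement) =====
-- stated objective: alternative
-- what changed: B replaces A's rescan-of-all-reads-per-candidate-track loop by one filtering pass collecting blocked track positions of overlapping reads into a set, sorting them, and computing the smallest missing non-negative integer by a single ordered scan.
import Mathlib
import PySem

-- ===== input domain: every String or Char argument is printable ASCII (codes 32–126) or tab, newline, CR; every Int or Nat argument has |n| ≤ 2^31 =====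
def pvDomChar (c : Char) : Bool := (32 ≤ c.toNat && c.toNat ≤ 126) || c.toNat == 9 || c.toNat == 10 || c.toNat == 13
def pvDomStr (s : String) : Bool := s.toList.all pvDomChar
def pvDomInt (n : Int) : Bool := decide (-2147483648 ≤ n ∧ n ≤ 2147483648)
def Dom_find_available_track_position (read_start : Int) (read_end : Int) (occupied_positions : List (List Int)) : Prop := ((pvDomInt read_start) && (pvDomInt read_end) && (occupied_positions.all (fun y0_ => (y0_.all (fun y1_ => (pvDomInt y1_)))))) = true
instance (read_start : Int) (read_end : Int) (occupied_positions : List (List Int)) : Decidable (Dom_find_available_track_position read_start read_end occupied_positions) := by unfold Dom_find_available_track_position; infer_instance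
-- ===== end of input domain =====

-- B replaces A's rescan-of-all-reads-per-candidate-track loop by filtering the overlapping reads'
-- track positions into a set, sorting it, and finding the smallest missing non-negative integer
-- by one ordered scan. Return-value equivalence; neither version mutates its arguments.


-- ===== PORT A =====
-- the inner 'for … break' of A: true iff no occupied read blocks track_pos
-- (indexing uses pyGetD: under Pre_ every index Python touches is in range, so it equals Python's r[i])
def pvCanPlaceA (read_start read_end track_pos : Int) : List (List Int) → Bool
  | [] => true
  | r :: rest =>
    if read_start ≤ PySem.List.pyGetD r 1 0 ∧ read_end ≥ PySem.List.pyGetD r 0 0 ∧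
       track_pos = PySem.List.pyGetD r 2 0
    then false
    else pvCanPlaceA read_start read_end track_pos rest

-- A's 'while True' loop; fuel only makes it total, occupied_positions.length + 1 always suffices
def pvLoopA (read_start read_end : Int) (occ : List (List Int)) : Int → Nat → Int
  | tp, 0 => tp
  | tp, fuel+1 =>
    if pvCanPlaceA read_start read_end tp occ then tp
    else pvLoopA read_start read_end occ (tp + 1) fuel

def find_available_track_position (read_start : Int) (read_end : Int) (occupied_positions : List (List Int)) : Int :=
  pvLoopA read_start read_end occupied_positions 0 (occupied_positions.length + 1)

-- ===== PORT B =====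
-- sorted({r[2] for r in occ if read_start <= r[1] and read_end >= r[0]})
def pvBlockedSorted (read_start read_end : Int) (occ : List (List Int)) : List Int :=
  PySem.List.sorted
    (PySem.Set.ofList
      ((occ.filter (fun r =>
          decide (read_start ≤ PySem.List.pyGetD r 1 0) &&
          decide (read_end ≥ PySem.List.pyGetD r 0 0))).map
        (fun r => PySem.List.pyGetD r 2 0)))
    (fun x => x) false

-- B's 'for v in blocked: if v == pos: pos += 1; elif v > pos: break' scan
def pvScanB : List Int → Int → Int
  | [], pos => pos
  | v :: rest, pos =>
    if v = pos then pvScanB rest (pos + 1)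
    else if v > pos then pos
    else pvScanB rest pos

def find_available_track_position_alt (read_start : Int) (read_end : Int) (occupied_positions : List (List Int)) : Int :=
  pvScanB (pvBlockedSorted read_start read_end occupied_positions) 0

-- ===== PRECONDITION & SPEC =====
-- Pre_ excludes exactly the inputs on which Python A raises IndexError: a read shorter than 2,
-- or an overlapping read shorter than 3 (B raises on exactly the same inputs).
def Pre_find_available_track_position (read_start : Int) (read_end : Int) (occupied_positions : List (List Int)) : Prop :=
  ∀ r ∈ occupied_positions, 2 ≤ r.length ∧
    ((read_start ≤ PySem.List.pyGetD r 1 0 ∧ read_end ≥ PySem.List.pyGetD r 0 0) → 3 ≤ r.length)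
instance (read_start : Int) (read_end : Int) (occupied_positions : List (List Int)) : Decidable (Pre_find_available_track_position read_start read_end occupied_positions) := by unfold Pre_find_available_track_position; infer_instance

def pvWitness_find_available_track_position : Int × Int × List (List Int) := (1, 5, [[0, 3, 0], [2, 9, 1]])

def Spec_find_available_track_position (read_start : Int) (read_end : Int) (occupied_positions : List (List Int)) (out : Int) : Prop := out = find_available_track_position_alt read_start read_end occupied_positions
instance (read_start : Int) (read_end : Int) (occupied_positions : List (List Int)) (out : Int) : Decidable (Spec_find_available_track_position read_start read_end occupied_positions out) := by unfold Spec_find_available_track_position; infer_instance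

-- ===== CLAIM (what is proved, stated in full; the proofs are below) =====
def Claim_equal_find_available_track_position : Prop := ∀ (read_start : Int) (read_end : Int) (occupied_positions : List (List Int)), Dom_find_available_track_position read_start read_end occupied_positions → Pre_find_available_track_position read_start read_end occupied_positions → Spec_find_available_track_position read_start read_end occupied_positions (find_available_track_position read_start read_end occupied_positions)

-- ===== LEMMAS AND PROOFS =====

-- 'm is the least element ≥ lo outside the blocked predicate S'
def pvLeastFree (S : Int → Prop) (lo m : Int) : Prop :=
  lo ≤ m ∧ ¬ S m ∧ ∀ x, lo ≤ x → x < m → S x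

lemma pvLeastFree_unique (S : Int → Prop) (lo m₁ m₂ : Int)
    (h₁ : pvLeastFree S lo m₁) (h₂ : pvLeastFree S lo m₂) : m₁ = m₂ := by
  obtain ⟨hl₁, hn₁, ha₁⟩ := h₁
  obtain ⟨hl₂, hn₂, ha₂⟩ := h₂
  by_contra hne
  rcases lt_or_gt_of_ne hne with h | h
  · exact hn₁ (ha₂ m₁ hl₁ h)
  · exact hn₂ (ha₁ m₂ hl₂ h)

-- membership in B's blocked list characterises A's inner scan failing
lemma mem_blockedSorted_iff (rs re x : Int) (occ : List (List Int)) :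
    x ∈ pvBlockedSorted rs re occ ↔ pvCanPlaceA rs re x occ = false := by
  unfold pvBlockedSorted
  rw [PySem.List.mem_sorted, PySem.Set.mem_ofList]
  induction occ with
  | nil => simp [pvCanPlaceA]
  | cons r rest ih =>
    simp only [pvCanPlaceA]
    split <;> rename_i h
    · obtain ⟨h1, h2, h3⟩ := h
      refine iff_of_true ?_ rfl
      simp only [List.filter_cons, List.mem_map]
      rw [if_pos (by simp [h1, h2])]
      exact ⟨r, List.mem_cons_self, h3.symm⟩
    · simp only [List.filter_cons]
      by_cases hc : rs ≤ PySem.List.pyGetD r 1 0 ∧ re ≥ PySem.List.pyGetD r 0 0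
      · rw [if_pos (by simp [hc.1, hc.2])]
        simp only [List.map_cons, List.mem_cons]
        rw [← ih]
        constructor
        · rintro (rfl | hx)
          · exact absurd ⟨hc.1, hc.2, rfl⟩ h
          · exact hx
        · exact Or.inr
      · rw [if_neg (by simpa using hc)]
        exact ih

-- A's fueled loop returns the least unblocked track, given enough fuel
lemma pvLoopA_leastFree (rs re : Int) (occ : List (List Int)) :
    ∀ (fuel : Nat) (tp : Int) (k : Nat), k < fuel →
      pvCanPlaceA rs re (tp + k) occ = true →
      pvLeastFree (fun x => pvCanPlaceA rs re x occ = false) tp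
        (pvLoopA rs re occ tp fuel) := by
  intro fuel
  induction fuel with
  | zero => intro tp k hk; omega
  | succ f ih =>
    intro tp k hk hcan
    by_cases hc : pvCanPlaceA rs re tp occ = true
    · simp only [pvLoopA, hc, if_true]
      exact ⟨le_refl _, by simp [hc], fun x h1 h2 => absurd h2 (not_lt.mpr h1)⟩
    · have hcf : pvCanPlaceA rs re tp occ = false := by
        cases hq : pvCanPlaceA rs re tp occ with
        | false => rfl | true => exact absurd hq hc
      have hk0 : k ≠ 0 := by
        rintro rfl; simp at hcan; exact hc hcan
      obtain ⟨k', rfl⟩ := Nat.exists_eq_succ_of_ne_zero hk0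
      have hcan' : pvCanPlaceA rs re (tp + 1 + k') occ = true := by
        have : tp + 1 + (k' : Int) = tp + ((k' + 1 : Nat) : Int) := by push_cast; ring
        rw [this]; exact hcan
      have hrec := ih (tp + 1) k' (by omega) hcan'
      obtain ⟨hl, hn, ha⟩ := hrec
      simp only [pvLoopA, hc]
      refine ⟨by omega, hn, fun x h1 h2 => ?_⟩
      by_cases hx : x = tp
      · subst hx; exact hcf
      · exact ha x (by omega) h2

-- B's ordered scan returns the least element ≥ pos missing from a strictly increasing list
lemma pvScanB_leastFree (l : List Int) (hl : l.Pairwise (· < ·)) :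
    ∀ pos : Int, pvLeastFree (· ∈ l) pos (pvScanB l pos) := by
  induction l with
  | nil =>
    intro pos
    simp only [pvScanB]
    exact ⟨le_refl _, by simp, fun x h1 h2 => absurd h2 (not_lt.mpr h1)⟩
  | cons v rest ih =>
    have hvr : ∀ u ∈ rest, v < u := fun u hu => (List.pairwise_cons.mp hl).1 u hu
    have hrest := ih (List.pairwise_cons.mp hl).2
    intro pos
    simp only [pvScanB]
    by_cases hv : v = pos
    · subst hv
      rw [if_pos rfl]
      obtain ⟨hl', hn, ha⟩ := hrest (v + 1)
      refine ⟨by omega, ?_, fun x h1 h2 => ?_⟩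
      · simp only [List.mem_cons, not_or]
        exact ⟨by omega, hn⟩
      · by_cases hx : x = v
        · simp [hx]
        · exact List.mem_cons_of_mem _ (ha x (by omega) h2)
    · rw [if_neg hv]
      by_cases hgt : v > pos
      · rw [if_pos hgt]
        refine ⟨le_refl _, ?_, fun x h1 h2 => absurd h2 (not_lt.mpr h1)⟩
        simp only [List.mem_cons, not_or]
        exact ⟨fun h => hv h.symm, fun h => absurd (hvr pos h) (by omega)⟩
      · rw [if_neg hgt]
        have hvlt : v < pos := by omega
        obtain ⟨hl', hn, ha⟩ := hrest pos
        refine ⟨hl', ?_, fun x h1 h2 => ?_⟩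
        · simp only [List.mem_cons, not_or]
          exact ⟨by omega, hn⟩
        · exact List.mem_cons_of_mem _ (ha x h1 h2)

-- the blocked list is short enough to pigeonhole: |ofList ∘ map ∘ filter| ≤ |occ|
lemma blockedSorted_length_le (rs re : Int) (occ : List (List Int)) :
    (pvBlockedSorted rs re occ).length ≤ occ.length := by
  unfold pvBlockedSorted
  rw [PySem.List.length_sorted]
  calc (PySem.Set.ofList _).length
      ≤ (List.map (fun r => PySem.List.pyGetD r 2 0)
          (occ.filter _)).length := PySem.Set.length_ofList_le _
    _ ≤ occ.length := by
        rw [List.length_map]; exact List.length_filter_le _ _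

-- pigeonhole: some k ∈ [0, l.length] is not an element of l
lemma exists_free_nat' (l : List Int) : ∃ k : Nat, k ≤ l.length ∧ (k : Int) ∉ l := by
  by_contra h
  push Not at h
  have hsub : (Finset.range (l.length + 1)).image (fun k : Nat => (k : Int)) ⊆ l.toFinset := by
    intro x hx
    simp only [Finset.mem_image, Finset.mem_range] at hx
    obtain ⟨k, hk, rfl⟩ := hx
    exact List.mem_toFinset.mpr (h k (by omega))
  have hcard := Finset.card_le_card hsub
  rw [Finset.card_image_of_injective _ (fun a b => by exact_mod_cast id),
      Finset.card_range] at hcard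
  have := l.toFinset_card_le
  omega

-- ===== VERDICT (by name: the statement is the Claim_ definition above) =====
theorem find_available_track_position_spec : Claim_equal_find_available_track_position := by
  intro rs re occ _hdom _hpre
  unfold Spec_find_available_track_position
  unfold find_available_track_position find_available_track_position_alt
  -- a free track exists below the fuel bound
  obtain ⟨k, hk, hkfree⟩ := exists_free_nat' (pvBlockedSorted rs re occ)
  have hkocc : k ≤ occ.length := le_trans hk (blockedSorted_length_le rs re occ)
  have hcan : pvCanPlaceA rs re ((0 : Int) + k) occ = true := by
    cases hq : pvCanPlaceA rs re ((0 : Int) + k) occ with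
    | true => rfl
    | false =>
      exact absurd ((mem_blockedSorted_iff rs re _ occ).mpr hq) (by simpa using hkfree)
  have hA := pvLoopA_leastFree rs re occ (occ.length + 1) 0 k (by omega) hcan
  have hB := pvScanB_leastFree (pvBlockedSorted rs re occ)
    (PySem.List.sorted_ofList_pairwise_lt _) 0
  -- both are the least free track over the same blocked predicate
  have hB' : pvLeastFree (fun x => pvCanPlaceA rs re x occ = false) 0
      (pvScanB (pvBlockedSorted rs re occ) 0) := by
    obtain ⟨h1, h2, h3⟩ := hB
    exact ⟨h1, fun hm => h2 ((mem_blockedSorted_iff rs re _ occ).mpr hm),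
      fun x hx1 hx2 => (mem_blockedSorted_iff rs re x occ).mp (h3 x hx1 hx2)⟩
  exact pvLeastFree_unique _ 0 _ _ hA hB'
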